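-- pv_equiv track=rewrite | github.com/teomaik/Code_Beauty_Calculator | code aesthetics/utils.py | calculate_quadrant_sums
-- ===== SOURCE A (Python) =====
-- def calculate_quadrant_sums(binary_table, middle_x, middle_y):
--     """
--     Calculates the sum of 1s in each of the four quadrants of the binary table.
--
--     Args:
--     - binary_table (list): A 2D list representing the binary table.
--     - middle_x (int): The middle index for the x-axis (columns).
--     - middle_y (int): The middle index for the y-axis (rows).
--
--     Returns:
--     - A tuple with four integers representing the sum of 1s in:
--       (top-left, top-right, bottom-left, bottom-right) quadrants.
--     """
--     # Initialize sums for each quadrant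
--     ul = 0
--     ur = 0
--     ll = 0
--     lr = 0
--
--     # Calculate sums for each quadrant
--     for y, row in enumerate(binary_table):
--         for x, value in enumerate(row):
--             if y <= middle_y and x <= middle_x:  # Top-left quadrant
--                 ul += value
--             elif y <= middle_y and x > middle_x:  # Top-right quadrant
--                 ur += value
--             elif y > middle_y and x <= middle_x:  # Bottom-left quadrant
--                 ll += value
--             elif y > middle_y and x > middle_x:  # Bottom-right quadrant
--                 lr += value
--
--         # Initialize counters for each quadrant
--     quadrant_counts = {
--         "UR": ur,  # Upper Right
--         "UL": ul,  # Upper Left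
--         "LR": lr,  # Lower Right
--         "LL": ll   # Lower Left
--     }
--
--     return quadrant_counts
-- ===== SOURCE B (Python) =====
-- def calculate_quadrant_sums(binary_table, middle_x, middle_y):
--     """Slice-and-sum re-implementation: split rows at the clamped row boundary,
--     split each row at the clamped column boundary, and sum the four slices."""
--     xs = max(middle_x + 1, 0)
--     ys = max(middle_y + 1, 0)
--     ul = ur = ll = lr = 0
--     for row in binary_table[:ys]:
--         ul += sum(row[:xs])
--         ur += sum(row[xs:])
--     for row in binary_table[ys:]:
--         ll += sum(row[:xs])
--         lr += sum(row[xs:])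
--     return {"UR": ur, "UL": ul, "LR": lr, "LL": ll}
-- ===== Notes on version B (the rewrite author's own statement) =====
-- stated objective: alternative
-- what changed: Replaces the per-cell 2x2 comparison branch inside nested enumerate loops by a geometric decomposition: the table is split once into top/bottom at the clamped row boundary and each row is sliced once at the clamped column boundary, summing whole slices.
import Mathlib
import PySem

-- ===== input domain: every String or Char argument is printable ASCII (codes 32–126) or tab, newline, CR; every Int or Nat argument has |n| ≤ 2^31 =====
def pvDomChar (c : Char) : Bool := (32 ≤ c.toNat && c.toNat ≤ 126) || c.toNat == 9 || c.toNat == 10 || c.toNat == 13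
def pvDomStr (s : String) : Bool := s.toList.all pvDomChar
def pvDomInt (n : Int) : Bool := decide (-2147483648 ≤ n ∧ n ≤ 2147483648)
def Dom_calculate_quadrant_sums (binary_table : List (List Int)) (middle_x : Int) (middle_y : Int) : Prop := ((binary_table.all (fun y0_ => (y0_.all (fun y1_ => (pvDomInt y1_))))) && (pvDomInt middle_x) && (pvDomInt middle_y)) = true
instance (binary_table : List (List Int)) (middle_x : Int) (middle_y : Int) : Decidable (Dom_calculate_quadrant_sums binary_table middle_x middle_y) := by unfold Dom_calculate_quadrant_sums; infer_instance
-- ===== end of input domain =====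

-- B replaces A's per-cell quadrant branch by slicing the table into top/bottom and each row
-- into left/right at the clamped boundaries and summing the slices (alternative decomposition).

-- ===== PORT A =====
-- A's inner-loop body: the four-way quadrant test on one cell (x = p.1 is the column index).
def pvAstep (mx my y : Int) (s : Int × Int × Int × Int) (p : Int × Int) : Int × Int × Int × Int :=
  if y ≤ my ∧ p.1 ≤ mx then (s.1 + p.2, s.2.1, s.2.2.1, s.2.2.2)
  else if y ≤ my ∧ p.1 > mx then (s.1, s.2.1 + p.2, s.2.2.1, s.2.2.2)
  else if y > my ∧ p.1 ≤ mx then (s.1, s.2.1, s.2.2.1 + p.2, s.2.2.2)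
  else if y > my ∧ p.1 > mx then (s.1, s.2.1, s.2.2.1, s.2.2.2 + p.2)
  else s

def calculate_quadrant_sums (binary_table : List (List Int)) (middle_x : Int) (middle_y : Int) : List (String × Int) :=
  let s := (PySem.List.enumerate binary_table 0).foldl
    (fun s yr => (PySem.List.enumerate yr.2 0).foldl (pvAstep middle_x middle_y yr.1) s)
    (0, 0, 0, 0)
  [("UR", s.2.1), ("UL", s.1), ("LR", s.2.2.2), ("LL", s.2.2.1)]

-- ===== PORT B =====
def calculate_quadrant_sums_alt (binary_table : List (List Int)) (middle_x : Int) (middle_y : Int) : List (String × Int) :=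
  let xs := (max (middle_x + 1) 0).toNat
  let ys := (max (middle_y + 1) 0).toNat
  let top := (binary_table.take ys).foldl
    (fun p row => (p.1 + (row.take xs).sum, p.2 + (row.drop xs).sum)) ((0 : Int), (0 : Int))
  let bot := (binary_table.drop ys).foldl
    (fun p row => (p.1 + (row.take xs).sum, p.2 + (row.drop xs).sum)) ((0 : Int), (0 : Int))
  [("UR", top.2), ("UL", top.1), ("LR", bot.2), ("LL", bot.1)]

-- ===== PRECONDITION & SPEC =====
def Spec_calculate_quadrant_sums (binary_table : List (List Int)) (middle_x : Int) (middle_y : Int) (out : List (String × Int)) : Prop := out = calculate_quadrant_sums_alt binary_table middle_x middle_y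
instance (binary_table : List (List Int)) (middle_x : Int) (middle_y : Int) (out : List (String × Int)) : Decidable (Spec_calculate_quadrant_sums binary_table middle_x middle_y out) := by unfold Spec_calculate_quadrant_sums; infer_instance

-- ===== CLAIM (what is proved, stated in full; the proofs are below) =====
def Claim_equal_calculate_quadrant_sums : Prop := ∀ (binary_table : List (List Int)) (middle_x : Int) (middle_y : Int), Dom_calculate_quadrant_sums binary_table middle_x middle_y → Spec_calculate_quadrant_sums binary_table middle_x middle_y (calculate_quadrant_sums binary_table middle_x middle_y)

-- ===== LEMMAS AND PROOFS =====

-- left / right slice sums of one row at the clamped column boundary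
def pvTL (mx : Int) (row : List Int) : Int := (row.take ((mx + 1).toNat)).sum
def pvTR (mx : Int) (row : List Int) : Int := (row.drop ((mx + 1).toNat)).sum

-- A's inner loop over one row (column indices starting at k) adds exactly the
-- left/right slice sums of the row, to the top or bottom pair according to y ≤ my.
lemma pvA_inner (mx my y : Int) (row : List Int) : ∀ (k : Int) (s : Int × Int × Int × Int),
    (PySem.List.enumerate row k).foldl (pvAstep mx my y) s =
      if y ≤ my then
        (s.1 + (row.take ((mx + 1 - k).toNat)).sum, s.2.1 + (row.drop ((mx + 1 - k).toNat)).sum,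
          s.2.2.1, s.2.2.2)
      else
        (s.1, s.2.1,
          s.2.2.1 + (row.take ((mx + 1 - k).toNat)).sum, s.2.2.2 + (row.drop ((mx + 1 - k).toNat)).sum) := by
  induction row with
  | nil => intro k s; simp [PySem.List.enumerate_nil]
  | cons v rest ih =>
    intro k s
    rw [PySem.List.enumerate_cons, List.foldl_cons, ih (k + 1)]
    by_cases hk : k ≤ mx
    · have h1 : (mx + 1 - k).toNat = (mx + 1 - (k + 1)).toNat + 1 := by omega
      simp only [pvAstep, h1, List.take_succ_cons, List.drop_succ_cons, List.sum_cons]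
      split_ifs with h2 h3 h4 h5 h6 <;> (simp_all; try ring_nf)
    · have h1 : (mx + 1 - k).toNat = 0 := by omega
      have h2 : (mx + 1 - (k + 1)).toNat = 0 := by omega
      simp only [pvAstep, h1, h2, List.take_zero, List.drop_zero, List.sum_nil, List.sum_cons]
      split_ifs with h3 h4 h5 h6 h7 <;> (simp_all; try ring_nf)
    
-- A's outer loop (row indices starting at k) accumulates slice sums of the
-- top (take) and bottom (drop) parts at the clamped row boundary.
lemma pvA_outer (mx my : Int) : ∀ (bt : List (List Int)) (k : Int) (s : Int × Int × Int × Int),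
    (PySem.List.enumerate bt k).foldl
        (fun s yr => (PySem.List.enumerate yr.2 0).foldl (pvAstep mx my yr.1) s) s =
      (s.1 + ((bt.take ((my + 1 - k).toNat)).map (pvTL mx)).sum,
        s.2.1 + ((bt.take ((my + 1 - k).toNat)).map (pvTR mx)).sum,
        s.2.2.1 + ((bt.drop ((my + 1 - k).toNat)).map (pvTL mx)).sum,
        s.2.2.2 + ((bt.drop ((my + 1 - k).toNat)).map (pvTR mx)).sum) := by
  intro bt
  induction bt with
  | nil => intro k s; simp [PySem.List.enumerate_nil]
  | cons r rest ih =>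
    intro k s
    rw [PySem.List.enumerate_cons, List.foldl_cons, ih (k + 1)]
    rw [pvA_inner mx my k r 0 s]
    by_cases hk : k ≤ my
    · have h1 : (my + 1 - k).toNat = (my + 1 - (k + 1)).toNat + 1 := by omega
      simp only [if_pos hk, h1, List.take_succ_cons, List.drop_succ_cons, List.map_cons,
        List.sum_cons, pvTL, pvTR]
      simp only [Int.sub_zero]
      refine Prod.ext ?_ (Prod.ext ?_ (Prod.ext ?_ ?_)) <;> simp <;> ring
    · have h1 : (my + 1 - k).toNat = 0 := by omega
      have h2 : (my + 1 - (k + 1)).toNat = 0 := by omega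
      simp only [if_neg hk, h1, h2, List.take_zero, List.drop_zero, List.map_nil, List.sum_nil,
        List.map_cons, List.sum_cons, pvTL, pvTR]
      simp only [Int.sub_zero]
      refine Prod.ext ?_ (Prod.ext ?_ (Prod.ext ?_ ?_)) <;> simp <;> ring

-- B's pairwise accumulating fold is the pair of slice-sum totals.
lemma pvB_fold (n : Nat) : ∀ (l : List (List Int)) (a b : Int),
    l.foldl (fun p row => (p.1 + (row.take n).sum, p.2 + (row.drop n).sum)) (a, b) =
      (a + (l.map (fun row => (row.take n).sum)).sum, b + (l.map (fun row => (row.drop n).sum)).sum) := by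
  intro l
  induction l with
  | nil => intro a b; simp
  | cons r rest ih =>
    intro a b
    rw [List.foldl_cons, ih]
    simp
    constructor <;> ring

-- ===== VERDICT (by name: the statement is the Claim_ definition above) =====
theorem calculate_quadrant_sums_spec : Claim_equal_calculate_quadrant_sums := by
  intro bt mx my _
  unfold Spec_calculate_quadrant_sums calculate_quadrant_sums calculate_quadrant_sums_alt
  dsimp only
  rw [pvA_outer mx my bt 0 (0, 0, 0, 0), pvB_fold, pvB_fold]
  have hx : (max (mx + 1) 0).toNat = (mx + 1).toNat := by omega
  have hy : (max (my + 1) 0).toNat = (my + 1).toNat := by omega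
  simp [hx, hy]
  exact ⟨rfl, rfl, rfl, rfl⟩
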